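-- pv_equiv track=rewrite | github.com/Sisyphus235/tech_lab | algorithm/math/print_max_n_digits.py | print_max_n_digits
-- ===== SOURCE A (Python) =====
-- def print_max_n_digits(n: int) -> list:
--     to_print = [0] * n
--     ret = []
--     while True:
--         val = add_one(to_print)
--         if val is False:
--             return ret
--         ret.append(val)
--
-- def add_one(array: list):
--     length = len(array)
--     cur = length - 1
--     while cur >= 0:
--         if array[cur] != 9:
--             array[cur] += 1
--             return ''.join(str(i) for i in array).lstrip('0')
--         array[cur] = 0
--         cur -= 1
--     return False
-- ===== SOURCE B (Python) =====
-- def print_max_n_digits(n: int) -> list: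
--     # Count directly over the integers instead of simulating a decimal odometer.
--     if n < 1:
--         return []
--     return [str(i) for i in range(1, 10 ** n)]
-- ===== Notes on version B (the rewrite author's own statement) =====
-- stated objective: simpler
-- what changed: Replaces the mutable decimal-odometer simulation (add_one carrying over a digit array and re-joining/lstripping the whole array into a string for every number) with direct integer counting: a guard returning the empty list for non-positive n, then a single comprehension mapping str over the integer range; the separate add_one helper disappears.
import Mathlib
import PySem

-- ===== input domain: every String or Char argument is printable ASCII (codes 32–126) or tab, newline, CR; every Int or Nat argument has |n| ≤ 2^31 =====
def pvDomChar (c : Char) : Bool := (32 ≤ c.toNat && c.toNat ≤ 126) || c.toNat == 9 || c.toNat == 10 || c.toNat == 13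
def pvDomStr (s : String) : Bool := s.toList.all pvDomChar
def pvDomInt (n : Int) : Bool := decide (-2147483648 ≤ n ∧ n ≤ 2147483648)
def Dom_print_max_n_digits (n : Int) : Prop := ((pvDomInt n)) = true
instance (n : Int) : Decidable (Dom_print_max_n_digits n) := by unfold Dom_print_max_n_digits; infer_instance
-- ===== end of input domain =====

-- B replaces A's mutable decimal-odometer simulation by direct integer counting over a range: simpler, and the add_one helper disappears.

-- ===== PORT A =====
-- ''.join(str(i) for i in array).lstrip('0'); lstrip('0') is ported by hand as dropWhile of '0' (exact: Python's lstrip("0") drops exactly the leading '0' characters)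
def pvJoinLstrip (array : List Int) : String :=
  String.ofList (List.dropWhile (· == '0') (PySem.Str.join "" (array.map PySem.Int.toStr)).toList)

-- the inner 'while cur >= 0' loop of add_one; 'cur' here is the Python index plus one, so 0 means the loop is over
def pvAddOneLoop (array : List Int) (cur : Nat) : Option (String × List Int) :=
  match cur with
  | 0 => none
  | c + 1 =>
    let d := array.getD c 0   -- array[cur]: the index is always in range in A
    if d ≠ 9 then
      let arr := array.set c (d + 1)
      some (pvJoinLstrip arr, arr)
    else pvAddOneLoop (array.set c 0) c

-- add_one returning False ↦ none; the mutated array is returned alongside the string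
def pv_add_one (array : List Int) : Option (String × List Int) :=
  pvAddOneLoop array array.length

-- 'while True' loop of A; fuel 10^n suffices: A performs exactly 10^n - 1 successful add_one steps plus the final failing one (proved below)
def pvPrintLoop (toPrint : List Int) (ret : List String) (fuel : Nat) : List String :=
  match fuel with
  | 0 => ret
  | f + 1 =>
    match pv_add_one toPrint with
    | none => ret
    | some (val, arr) => pvPrintLoop arr (ret ++ [val]) f

def print_max_n_digits (n : Int) : List String :=
  pvPrintLoop (List.replicate n.toNat 0) [] ((10 : Nat) ^ n.toNat)

-- ===== PORT B =====
def print_max_n_digits_alt (n : Int) : List String :=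
  if n < 1 then []
  else (PySem.List.pyRange 1 ((10 : Int) ^ n.toNat) 1).map PySem.Int.toStr

-- ===== PRECONDITION & SPEC =====
def Spec_print_max_n_digits (n : Int) (out : List String) : Prop := out = print_max_n_digits_alt n
instance (n : Int) (out : List String) : Decidable (Spec_print_max_n_digits n out) := by unfold Spec_print_max_n_digits; infer_instance

-- ===== CLAIM (what is proved, stated in full; the proofs are below) =====
def Claim_equal_print_max_n_digits : Prop := ∀ (n : Int), Dom_print_max_n_digits n → Spec_print_max_n_digits n (print_max_n_digits n)

-- ===== LEMMAS AND PROOFS =====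

-- the canonical decimal digit characters of a natural number
def pvMyDigits (k : Nat) : List Char :=
  if _h : k < 10 then [Nat.digitChar k]
  else pvMyDigits (k / 10) ++ [Nat.digitChar (k % 10)]
decreasing_by exact Nat.div_lt_self (by omega) (by omega)

-- the n-digit zero-padded (big-endian) decimal representation of k, as A's digit array
def pvPad : Nat → Nat → List Int
  | 0, _ => []
  | n + 1, k => pvPad n (k / 10) ++ [((k % 10 : Nat) : Int)]

lemma pvMyDigits_small (k : Nat) (h : k < 10) : pvMyDigits k = [Nat.digitChar k] := by
  rw [pvMyDigits, dif_pos h]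

lemma pvMyDigits_large (k : Nat) (h : ¬ k < 10) :
    pvMyDigits k = pvMyDigits (k / 10) ++ [Nat.digitChar (k % 10)] := by
  rw [pvMyDigits, dif_neg h]

lemma pvToDigitsCore_eq : ∀ f n, n < f → ∀ ds : List Char,
    Nat.toDigitsCore 10 f n ds = pvMyDigits n ++ ds := by
  intro f
  induction f with
  | zero => omega
  | succ g ih =>
    intro n hn ds
    rw [Nat.toDigitsCore]
    by_cases h10 : n / 10 = 0
    · simp only [h10, reduceIte]
      have hlt : n < 10 := by omega
      rw [pvMyDigits_small n hlt, Nat.mod_eq_of_lt hlt]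
      rfl
    · simp only [if_neg h10]
      rw [ih (n / 10) (by omega) (Nat.digitChar (n % 10) :: ds)]
      rw [pvMyDigits_large n (by omega)]
      simp

lemma pvToChars_eq (k : Nat) : PySem.Int.toChars (k : Int) = pvMyDigits k := by
  simp only [PySem.Int.toChars]
  rw [if_neg (by omega)]
  simp only [Int.toNat_natCast]
  rw [Nat.toDigits, pvToDigitsCore_eq (k + 1) k (Nat.lt_succ_self k), List.append_nil]

lemma pvMyDigits_ne_nil (k : Nat) : pvMyDigits k ≠ [] := by
  by_cases h : k < 10
  · rw [pvMyDigits_small k h]; simp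
  · rw [pvMyDigits_large k h]; simp

lemma pvPad_length (n k : Nat) : (pvPad n k).length = n := by
  induction n generalizing k with
  | zero => rfl
  | succ m ih => simp [pvPad, ih]

lemma pvPad_zero (n : Nat) : pvPad n 0 = List.replicate n 0 := by
  induction n with
  | zero => rfl
  | succ m ih => simp [pvPad, ih, List.replicate_succ']

lemma pvPad_digit (n k : Nat) : ∀ d ∈ pvPad n k, 0 ≤ d ∧ d ≤ 9 := by
  induction n generalizing k with
  | zero => simp [pvPad]
  | succ m ih =>
    intro d hd
    simp only [pvPad, List.mem_append, List.mem_singleton] at hd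
    rcases hd with h | h
    · exact ih (k / 10) d h
    · subst h
      constructor <;> [positivity; exact_mod_cast Nat.le_of_lt_succ (Nat.mod_lt k (by omega))]

lemma pvToChars_digit (d : Int) (h0 : 0 ≤ d) (h9 : d ≤ 9) :
    PySem.Int.toChars d = [Nat.digitChar d.toNat] := by
  interval_cases d <;> decide

lemma pvCharsOfPad (n k : Nat) :
    (PySem.Str.join "" ((pvPad n k).map PySem.Int.toStr)).toList
      = (pvPad n k).map (fun d => Nat.digitChar d.toNat) := by
  rw [PySem.Str.toList_join]
  have h1 : List.map String.toList ((pvPad n k).map PySem.Int.toStr)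
      = ((pvPad n k).map (fun d => Nat.digitChar d.toNat)).map (fun c => [c]) := by
    simp only [List.map_map]
    apply List.map_congr_left
    intro d hd
    obtain ⟨h0, h9⟩ := pvPad_digit n k d hd
    simp [PySem.Int.toList_toStr, pvToChars_digit d h0 h9]
  rw [h1]
  simpa using PySem.Chars.join_nil_singletons ((pvPad n k).map (fun d => Nat.digitChar d.toNat))

lemma pvStrip_pad (n : Nat) : ∀ k, 0 < k → k < 10 ^ n →
    List.dropWhile (· == '0') ((pvPad n k).map (fun d => Nat.digitChar d.toNat)) = pvMyDigits k := by
  induction n with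
  | zero => intro k h1 h2; omega
  | succ m ih =>
    intro k h1 h2
    simp only [pvPad, List.map_append, List.map_cons, List.map_nil, Int.toNat_natCast]
    rw [List.dropWhile_append]
    by_cases h : k < 10
    · have hq : k / 10 = 0 := by omega
      rw [hq, pvPad_zero, List.map_replicate]
      simp only [Int.toNat_zero, List.dropWhile_replicate]
      have hk10 : k % 10 = k := Nat.mod_eq_of_lt h
      rw [hk10, pvMyDigits_small k h]
      have hne : (Nat.digitChar k == '0') = false := by interval_cases k <;> decide
      have hz0 : Nat.digitChar 0 = '0' := rfl
      simp [hz0, hne]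
    · have hq1 : 0 < k / 10 := by omega
      have hq2 : k / 10 < 10 ^ m := by
        rw [Nat.div_lt_iff_lt_mul (by omega)]
        calc k < 10 ^ (m + 1) := h2
          _ = 10 ^ m * 10 := by ring
      rw [ih (k / 10) hq1 hq2]
      have hne := pvMyDigits_ne_nil (k / 10)
      rw [pvMyDigits_large k h]
      simp [hne]

lemma pvJoinLstrip_pad (n k : Nat) (h1 : 0 < k) (h2 : k < 10 ^ n) :
    pvJoinLstrip (pvPad n k) = PySem.Int.toStr (k : Int) := by
  unfold pvJoinLstrip
  rw [pvCharsOfPad, pvStrip_pad n k h1 h2]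
  rw [PySem.Int.toStr, pvToChars_eq]

lemma pvAddOne_succ (n : Nat) : ∀ (k : Nat) (suffix : List Int), k + 1 < 10 ^ n →
    pvAddOneLoop (pvPad n k ++ suffix) n
      = some (pvJoinLstrip (pvPad n (k + 1) ++ suffix), pvPad n (k + 1) ++ suffix) := by
  induction n with
  | zero => intro k suffix h; omega
  | succ m ih =>
    intro k suffix h
    rw [pvAddOneLoop]
    have hpad : pvPad (m + 1) k ++ suffix = pvPad m (k / 10) ++ (((k % 10 : Nat) : Int) :: suffix) := by
      simp [pvPad]
    rw [hpad]
    have hlen : (pvPad m (k / 10)).length = m := pvPad_length m (k / 10)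
    have hget : (pvPad m (k / 10) ++ (((k % 10 : Nat) : Int) :: suffix)).getD m 0 = ((k % 10 : Nat) : Int) := by
      rw [List.getD_append_right _ _ _ m hlen.le, hlen]
      simp
    rw [hget]
    by_cases h9 : k % 10 = 9
    · -- carry: digit is 9, zero it and continue left
      rw [if_neg (by simp [h9])]
      have hset : (pvPad m (k / 10) ++ (((k % 10 : Nat) : Int) :: suffix)).set m 0
          = pvPad m (k / 10) ++ ((0 : Int) :: suffix) := by
        rw [List.set_append, if_neg (by omega), hlen]
        simp
      rw [hset]
      have hq : k / 10 + 1 < 10 ^ m := by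
        have hp : 10 ^ (m + 1) = 10 ^ m * 10 := by ring
        omega
      have := ih (k / 10) ((0 : Int) :: suffix) hq
      rw [this]
      have hpad' : pvPad (m + 1) (k + 1) ++ suffix = pvPad m (k / 10 + 1) ++ ((0 : Int) :: suffix) := by
        have e1 : (k + 1) / 10 = k / 10 + 1 := by omega
        have e2 : (k + 1) % 10 = 0 := by omega
        simp [pvPad, e1, e2]
      rw [hpad']
    · -- no carry: increment the digit and stop
      rw [if_pos (by simpa using (fun he : ((k % 10 : Nat) : Int) = 9 => h9 (by exact_mod_cast he)))]
      have hset : (pvPad m (k / 10) ++ (((k % 10 : Nat) : Int) :: suffix)).set m (((k % 10 : Nat) : Int) + 1)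
          = pvPad m (k / 10) ++ ((((k % 10 : Nat) : Int) + 1) :: suffix) := by
        rw [List.set_append, if_neg (by omega), hlen]
        simp
      rw [hset]
      have hpad' : pvPad (m + 1) (k + 1) ++ suffix = pvPad m (k / 10) ++ ((((k % 10 : Nat) : Int) + 1) :: suffix) := by
        have e1 : (k + 1) / 10 = k / 10 := by omega
        have e2 : (k + 1) % 10 = k % 10 + 1 := by omega
        simp [pvPad, e1, e2]
      rw [hpad']

lemma pvAddOne_last (n : Nat) : ∀ suffix : List Int,
    pvAddOneLoop (pvPad n (10 ^ n - 1) ++ suffix) n = none := by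
  induction n with
  | zero => intro suffix; rfl
  | succ m ih =>
    intro suffix
    have hp : 10 ^ (m + 1) = 10 ^ m * 10 := by ring
    have hP : 1 ≤ 10 ^ m := Nat.one_le_pow _ _ (by omega)
    have e1 : (10 ^ (m + 1) - 1) / 10 = 10 ^ m - 1 := by omega
    have e2 : (10 ^ (m + 1) - 1) % 10 = 9 := by omega
    rw [pvAddOneLoop]
    have hpad : pvPad (m + 1) (10 ^ (m + 1) - 1) ++ suffix
        = pvPad m (10 ^ m - 1) ++ ((9 : Int) :: suffix) := by
      simp [pvPad, e1, e2]
    rw [hpad]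
    have hlen : (pvPad m (10 ^ m - 1)).length = m := pvPad_length m _
    have hget : (pvPad m (10 ^ m - 1) ++ ((9 : Int) :: suffix)).getD m 0 = (9 : Int) := by
      rw [List.getD_append_right _ _ _ m hlen.le, hlen]
      simp
    rw [hget, if_neg (by simp)]
    have hset : (pvPad m (10 ^ m - 1) ++ ((9 : Int) :: suffix)).set m 0
        = pvPad m (10 ^ m - 1) ++ ((0 : Int) :: suffix) := by
      rw [List.set_append, if_neg (by omega), hlen]
      simp
    rw [hset]
    exact ih ((0 : Int) :: suffix)

lemma pvLoop_eq (n : Nat) : ∀ (fuel k : Nat) (ret : List String), k < 10 ^ n → 10 ^ n - k ≤ fuel →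
    pvPrintLoop (pvPad n k) ret fuel
      = ret ++ (List.range (10 ^ n - (k + 1))).map
          (fun j : Nat => PySem.Int.toStr ((k : Int) + 1 + (j : Int))) := by
  intro fuel
  induction fuel with
  | zero => intro k ret h1 h2; omega
  | succ f ih =>
    intro k ret h1 h2
    rw [pvPrintLoop]
    have hlen : pv_add_one (pvPad n k) = pvAddOneLoop (pvPad n k) n := by
      rw [pv_add_one, pvPad_length]
    by_cases hlast : k = 10 ^ n - 1
    · subst hlast
      rw [hlen]
      have := pvAddOne_last n ([] : List Int)
      rw [List.append_nil] at this
      rw [this]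
      have hz : 10 ^ n - (10 ^ n - 1 + 1) = 0 := by omega
      simp [hz]
    · have hk1 : k + 1 < 10 ^ n := by omega
      rw [hlen]
      have hsome := pvAddOne_succ n k ([] : List Int) hk1
      rw [List.append_nil] at hsome
      rw [hsome]
      change pvPrintLoop (pvPad n (k + 1) ++ []) (ret ++ [pvJoinLstrip (pvPad n (k + 1) ++ [])]) f = _
      simp only [List.append_nil]
      rw [ih (k + 1) (ret ++ [pvJoinLstrip (pvPad n (k + 1))]) hk1 (by omega)]
      rw [pvJoinLstrip_pad n (k + 1) (by omega) hk1]
      have hsplit : 10 ^ n - (k + 1) = 10 ^ n - (k + 2) + 1 := by omega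
      rw [hsplit, List.range_succ_eq_map, List.map_cons, List.map_map, List.append_assoc,
        List.singleton_append]
      congr 2
      apply List.map_congr_left
      intro j _
      simp only [Function.comp_apply]
      congr 1
      push_cast [Nat.succ_eq_add_one]
      ring

theorem pv_main (n : Int) : print_max_n_digits n = print_max_n_digits_alt n := by
  unfold print_max_n_digits print_max_n_digits_alt
  rw [← pvPad_zero n.toNat]
  rw [pvLoop_eq n.toNat (10 ^ n.toNat) 0 [] (by positivity) (Nat.sub_le _ _)]
  by_cases hn : n < 1
  · rw [if_pos hn]
    have hm0 : n.toNat = 0 := by omega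
    simp [hm0]
  · rw [if_neg hn]
    rw [PySem.List.pyRange_one]
    have hcv : (10 : Int) ^ n.toNat = ((10 ^ n.toNat : Nat) : Int) := by push_cast; ring
    have hcast : ((10 : Int) ^ n.toNat - 1).toNat = 10 ^ n.toNat - 1 := by
      rw [hcv]; omega
    rw [hcast, List.nil_append, List.map_map]
    apply List.map_congr_left
    intro j _
    simp only [Function.comp_apply]
    congr 1

-- ===== VERDICT (by name: the statement is the Claim_ definition above) =====
theorem print_max_n_digits_spec : Claim_equal_print_max_n_digits := by
  intro n _hdom
  unfold Spec_print_max_n_digits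
  exact pv_main n
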